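-- pv_equiv track=rewrite | github.com/gmadurov/Financial-Mathematics | final Financial Mathematics.py | f
-- ===== SOURCE A (Python) =====
-- def C(st, k):
--     return max(st - k, 0)
--
-- def f(line):
--     out = []
--     for st in line:
--         k1 = 40000
--         k2 = 42000
--         k3 = 44000
--         out.append(C(st, k1) - 3 * C(st, k2) + 2 * C(st, k3))
--     return out
-- ===== SOURCE B (Python) =====
-- def f(line):
--     # Using C(st, k) = st - min(st, k), the spread payoff collapses to a
--     # branch-free linear combination of clamped values:
--     #   C(st,40000) - 3*C(st,42000) + 2*C(st,44000)
--     #     = 3*min(st,42000) - min(st,40000) - 2*min(st,44000)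
--     m1 = [min(st, 40000) for st in line]
--     m2 = [min(st, 42000) for st in line]
--     m3 = [min(st, 44000) for st in line]
--     return [3 * b - a - 2 * c for a, b, c in zip(m1, m2, m3)]
-- ===== Notes on version B (the rewrite author's own statement) =====
-- stated objective: alternative
-- what changed: Replaces the single accumulator loop summing three max-based call payoffs with staged passes: three clamped (min) lists built first, then combined elementwise via the branch-free identity C(st,k)=st-min(st,k), so the payoff is 3*min(st,42000)-min(st,40000)-2*min(st,44000) with no max, no branches and no helper.
import Mathlib
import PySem

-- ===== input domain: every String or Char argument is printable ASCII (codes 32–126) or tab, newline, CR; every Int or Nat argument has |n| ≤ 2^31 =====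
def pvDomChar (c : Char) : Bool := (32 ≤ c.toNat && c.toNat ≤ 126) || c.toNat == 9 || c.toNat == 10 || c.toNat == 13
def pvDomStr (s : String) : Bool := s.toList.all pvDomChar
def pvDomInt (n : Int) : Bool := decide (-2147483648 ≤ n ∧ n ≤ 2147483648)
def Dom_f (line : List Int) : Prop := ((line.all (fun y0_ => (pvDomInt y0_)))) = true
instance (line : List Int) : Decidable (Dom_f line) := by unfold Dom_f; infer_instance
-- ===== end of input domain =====

-- B: staged passes — three clamped (min) lists, then a branch-free elementwise
-- combination via C(st,k)=st-min(st,k); alternative decomposition, same cost.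
-- ===== PORT A =====
def C (st k : Int) : Int := max (st - k) 0

def f (line : List Int) : List Int :=
  line.foldl (fun out st =>
    let k1 : Int := 40000
    let k2 : Int := 42000
    let k3 : Int := 44000
    out ++ [C st k1 - 3 * C st k2 + 2 * C st k3]) []

-- ===== PORT B =====
def f_alt (line : List Int) : List Int :=
  let m1 := line.map (fun st => min st 40000)
  let m2 := line.map (fun st => min st 42000)
  let m3 := line.map (fun st => min st 44000)
  (m1.zip (m2.zip m3)).map (fun x => 3 * x.2.1 - x.1 - 2 * x.2.2)

-- ===== PRECONDITION & SPEC =====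
def Spec_f (line : List Int) (out : List Int) : Prop := out = f_alt line
instance (line : List Int) (out : List Int) : Decidable (Spec_f line out) := by unfold Spec_f; infer_instance

-- ===== CLAIM (what is proved, stated in full; the proofs are below) =====
def Claim_equal_f : Prop := ∀ (line : List Int), Dom_f line → Spec_f line (f line)

-- ===== LEMMAS AND PROOFS =====
lemma step_eq (st : Int) :
    C st 40000 - 3 * C st 42000 + 2 * C st 44000 =
    3 * min st 42000 - min st 40000 - 2 * min st 44000 := by
  simp only [C, max_def, min_def]
  split_ifs <;> omega

lemma f_eq_map (line : List Int) (acc : List Int) :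
    line.foldl (fun out st =>
      let k1 : Int := 40000
      let k2 : Int := 42000
      let k3 : Int := 44000
      out ++ [C st k1 - 3 * C st k2 + 2 * C st k3]) acc =
    acc ++ line.map (fun st => C st 40000 - 3 * C st 42000 + 2 * C st 44000) := by
  induction line generalizing acc with
  | nil => simp
  | cons st rest ih => simp [ih, List.append_assoc]

lemma f_alt_eq_map (line : List Int) :
    f_alt line =
    line.map (fun st => 3 * min st 42000 - min st 40000 - 2 * min st 44000) := by
  unfold f_alt
  induction line with
  | nil => rfl
  | cons st rest ih => simpa using ih

-- ===== VERDICT (by name: the statement is the Claim_ definition above) =====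
theorem f_spec : Claim_equal_f := by
  intro line _
  unfold Spec_f f
  rw [f_eq_map, f_alt_eq_map, List.nil_append]
  exact List.map_congr_left (fun st _ => step_eq st)
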